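-- pv_equiv track=rewrite | github.com/laneashipley-create/25-26-Tier-1-Soccer-Database | master_games_report.py | date_bounds_master
-- ===== SOURCE A (Python) =====
-- def date_bounds_master(rows: list[dict]) -> tuple[str, str]:
--     dates: list[str] = []
--     for r in rows:
--         d = (r.get("match_date") or "")[:10]
--         if len(d) == 10 and d[4] == "-" and d[7] == "-":
--             dates.append(d)
--     if not dates:
--         return "", ""
--     return min(dates), max(dates)
-- ===== SOURCE B (Python) =====
-- def date_bounds_master(rows: list[dict]) -> tuple[str, str]:
--     lo = hi = None
--     for r in rows:
--         d = (r.get("match_date") or "")[:10]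
--         if len(d) == 10 and d[4] == "-" and d[7] == "-":
--             if lo is None or d < lo:
--                 lo = d
--             if hi is None or hi < d:
--                 hi = d
--     if lo is None:
--         return "", ""
--     return lo, hi
-- ===== Notes on version B (the rewrite author's own statement) =====
-- stated objective: alternative
-- what changed: B keeps running min/max bounds in a single pass instead of building an intermediate list of valid dates and scanning it twice with min() and max().
import Mathlib
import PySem

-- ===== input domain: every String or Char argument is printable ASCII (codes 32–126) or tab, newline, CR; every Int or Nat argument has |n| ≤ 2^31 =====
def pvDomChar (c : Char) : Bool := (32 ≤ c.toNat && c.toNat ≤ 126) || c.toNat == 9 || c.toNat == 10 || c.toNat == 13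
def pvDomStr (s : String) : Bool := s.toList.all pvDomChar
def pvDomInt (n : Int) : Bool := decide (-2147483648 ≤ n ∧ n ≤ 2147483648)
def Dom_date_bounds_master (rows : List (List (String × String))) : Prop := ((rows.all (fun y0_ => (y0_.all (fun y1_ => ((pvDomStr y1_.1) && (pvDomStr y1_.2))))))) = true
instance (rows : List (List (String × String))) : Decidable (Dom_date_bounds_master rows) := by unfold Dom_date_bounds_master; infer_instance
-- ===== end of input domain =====

-- B replaces A's build-a-list-then-min()/max() with a single pass keeping running lo/hi bounds (same cost, alternative decomposition).
-- ===== PORT A =====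
-- shared row helper: d = (r.get("match_date") or "")[:10], valid iff len==10 and dashes at positions 4 and 7
def pvRowDate (r : List (String × String)) : Option String :=
  let s := ((r.find? (fun p => p.1 == "match_date")).map Prod.snd).getD ""
  let d := s.toList.take 10
  if d.length = 10 ∧ d[4]? = some '-' ∧ d[7]? = some '-' then some (String.ofList d) else none

def pvStepA (dates : List String) (r : List (String × String)) : List String :=
  match pvRowDate r with
  | some d => dates ++ [d]
  | none => dates

def date_bounds_master (rows : List (List (String × String))) : String × String :=
  let dates := rows.foldl pvStepA []
  if dates = [] then ("", "")
  else ((PySem.List.min? dates (fun x => x)).getD "", (PySem.List.max? dates (fun x => x)).getD "")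

-- ===== PORT B =====
def pvStepB (st : Option (String × String)) (r : List (String × String)) : Option (String × String) :=
  match pvRowDate r with
  | some d =>
    match st with
    | none => some (d, d)
    | some (lo, hi) => some (if d < lo then d else lo, if hi < d then d else hi)
  | none => st

def date_bounds_master_alt (rows : List (List (String × String))) : String × String :=
  match rows.foldl pvStepB none with
  | none => ("", "")
  | some (lo, hi) => (lo, hi)

-- ===== PRECONDITION & SPEC =====
def Spec_date_bounds_master (rows : List (List (String × String))) (out : String × String) : Prop := out = date_bounds_master_alt rows
instance (rows : List (List (String × String))) (out : String × String) : Decidable (Spec_date_bounds_master rows out) := by unfold Spec_date_bounds_master; infer_instance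

-- ===== CLAIM (what is proved, stated in full; the proofs are below) =====
def Claim_equal_date_bounds_master : Prop := ∀ (rows : List (List (String × String))), Dom_date_bounds_master rows → Spec_date_bounds_master rows (date_bounds_master rows)

-- ===== LEMMAS AND PROOFS =====

def pvFMin (a d : String) : String := if d < a then d else a
def pvFMax (a d : String) : String := if a < d then d else a

theorem pvFMin_eq_min : pvFMin = fun a d : String => min a d := by
  funext a d
  unfold pvFMin
  rw [min_def]
  rcases le_or_gt a d with h | h
  · simp [h, not_lt.mpr h]
  · simp [h, not_le.mpr h]

theorem pvFMax_eq_max : pvFMax = fun a d : String => max a d := by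
  funext a d
  unfold pvFMax
  rw [max_def]
  rcases le_or_gt a d with h | h
  · rcases eq_or_lt_of_le h with rfl | h'
    · simp
    · simp [h, h']
  · simp [not_le.mpr h, not_lt.mpr (le_of_lt h)]

theorem foldA_eq (rows : List (List (String × String))) (acc : List String) :
    rows.foldl pvStepA acc = acc ++ rows.filterMap pvRowDate := by
  induction rows generalizing acc with
  | nil => simp
  | cons r rows ih =>
    rw [List.foldl_cons, List.filterMap_cons, ih]
    unfold pvStepA
    cases pvRowDate r <;> simp

theorem foldB_some (rows : List (List (String × String))) (lo hi : String) :
    rows.foldl pvStepB (some (lo, hi))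
    = some ((rows.filterMap pvRowDate).foldl pvFMin lo,
            (rows.filterMap pvRowDate).foldl pvFMax hi) := by
  induction rows generalizing lo hi with
  | nil => simp
  | cons r rows ih =>
    cases h : pvRowDate r with
    | none =>
      simp only [List.foldl_cons, List.filterMap_cons, h, pvStepB]
      exact ih lo hi
    | some d =>
      simp only [List.foldl_cons, List.filterMap_cons, h, pvStepB]
      rw [ih]
      simp only [pvFMin, pvFMax]

theorem foldB_none (rows : List (List (String × String))) :
    rows.foldl pvStepB none
    = match rows.filterMap pvRowDate with
      | [] => none
      | d :: ds => some (ds.foldl pvFMin d, ds.foldl pvFMax d) := by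
  induction rows with
  | nil => simp
  | cons r rows ih =>
    cases h : pvRowDate r with
    | none =>
      simp only [List.foldl_cons, List.filterMap_cons, h, pvStepB]
      exact ih
    | some d =>
      simp only [List.foldl_cons, List.filterMap_cons, h, pvStepB]
      rw [foldB_some]

-- ===== VERDICT (by name: the statement is the Claim_ definition above) =====
theorem date_bounds_master_spec : Claim_equal_date_bounds_master := by
  intro rows _
  unfold Spec_date_bounds_master date_bounds_master date_bounds_master_alt
  rw [foldA_eq, foldB_none, List.nil_append]
  cases h : rows.filterMap pvRowDate with
  | nil => simp
  | cons d ds =>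
    simp only [List.cons_ne_nil, ite_false]
    rw [PySem.List.min?_id_cons, PySem.List.max?_id_cons, pvFMin_eq_min, pvFMax_eq_max]
    simp
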